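-- pv_equiv track=rewrite | github.com/AliKhanat88/codeforces | new_2024/global 27/d.py | bigger
-- ===== SOURCE A (Python) =====
-- from copy import deepcopy
--
-- def bigger(a, b):
--     a = deepcopy(a)
--     b = deepcopy(b)
--     if a[1] >= b[1]:
--         while a[1] > b[1]:
--             if a[0] > b[0]:
--                 return True
--             a[1] -= 1
--             a[0] *= 2
--         if a[0]>= b[0]:
--             return True
--         else:
--             return False
--     else:
--         while a[1] < b[1]:
--             if a[0] < b[0]:
--                 return False
--             b[1] -= 1
--             b[0] *= 2
--         if a[0] >= b[0]:
--             return True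
--         else:
--             return False
-- ===== SOURCE B (Python) =====
-- def bigger(a, b):
--     d = a[1] - b[1]
--     if d >= 0:
--         return (a[0] << d) >= b[0]
--     else:
--         return a[0] >= (b[0] << (-d))
-- ===== Notes on version B (the rewrite author's own statement) =====
-- stated objective: faster
-- what changed: Replaces the step-by-step doubling loop (one big-int multiplication per unit of exponent difference, with an early-exit compare each step) by a single left shift of the higher-exponent mantissa and one comparison.
-- intended difference: When both mantissas are negative and sandwiched (e.g. b[1]<=a[1], b[0]<a[0] but a[0]*2^(a[1]-b[1])<b[0]), A's early return fires on the not-yet-fully-shifted mantissa and wrongly reports True (symmetrically False in the other branch); B returns the correct comparison of a[0]*2^a[1] with b[0]*2^b[1], which is the function's evident purpose. — e.g. on bigger([-2, 1], [-3, 0]): A returns true, B returns false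
import Mathlib
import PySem

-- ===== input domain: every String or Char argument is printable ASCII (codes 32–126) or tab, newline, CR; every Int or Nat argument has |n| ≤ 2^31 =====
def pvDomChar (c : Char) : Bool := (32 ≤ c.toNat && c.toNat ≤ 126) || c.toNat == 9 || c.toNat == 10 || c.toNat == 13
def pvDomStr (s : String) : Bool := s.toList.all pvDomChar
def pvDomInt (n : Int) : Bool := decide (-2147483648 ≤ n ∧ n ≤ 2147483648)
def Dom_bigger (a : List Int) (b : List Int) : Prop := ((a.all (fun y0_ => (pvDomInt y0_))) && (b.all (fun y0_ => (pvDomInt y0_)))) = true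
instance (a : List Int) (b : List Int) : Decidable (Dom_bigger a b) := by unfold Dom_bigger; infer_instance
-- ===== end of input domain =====

-- B replaces A's per-step doubling loop by a single shift (here: one power of two) and one
-- comparison; on the stated corner D_ (negative sandwiched mantissas) A's early return is
-- wrong and B returns the intended comparison of a[0]*2^a[1] with b[0]*2^b[1].

-- ===== PORT A =====
-- the 'while a[1] > b[1]' loop: fuel = a[1] - b[1]; a[1]/b[1] themselves are only loop control
def biggerLoopA (a0 b0 : Int) : Nat → Bool
  | 0 => decide (a0 ≥ b0)
  | n+1 => if a0 > b0 then true else biggerLoopA (a0 * 2) b0 n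

-- the 'while a[1] < b[1]' loop: fuel = b[1] - a[1]
def biggerLoopB (a0 b0 : Int) : Nat → Bool
  | 0 => decide (a0 ≥ b0)
  | n+1 => if a0 < b0 then false else biggerLoopB a0 (b0 * 2) n

def bigger (a : List Int) (b : List Int) : Bool :=
  match PySem.List.pyGet? a 0, PySem.List.pyGet? a 1,
        PySem.List.pyGet? b 0, PySem.List.pyGet? b 1 with
  | some a0, some a1, some b0, some b1 =>
      if a1 ≥ b1 then biggerLoopA a0 b0 (a1 - b1).toNat
      else biggerLoopB a0 b0 (b1 - a1).toNat
  | _, _, _, _ => false    -- IndexError (excluded by Pre_)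

-- ===== PORT B =====
def bigger_alt (a : List Int) (b : List Int) : Bool :=
  (((PySem.List.pyGet? a 0).bind fun a0 => (PySem.List.pyGet? a 1).bind fun a1 =>
    (PySem.List.pyGet? b 0).bind fun b0 => (PySem.List.pyGet? b 1).map fun b1 =>
      let d := a1 - b1
      if d ≥ 0 then decide (a0 * 2 ^ d.toNat ≥ b0)    -- (a[0] << d) >= b[0]
      else decide (a0 ≥ b0 * 2 ^ (-d).toNat)          -- a[0] >= (b[0] << -d)
   ).getD false)   -- getD's default is unreachable under Pre_ (IndexError side)

-- ===== PRECONDITION & SPEC =====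
-- Pre_ excludes only lists shorter than 2, on which Python A raises IndexError
def Pre_bigger (a : List Int) (b : List Int) : Prop := 2 ≤ a.length ∧ 2 ≤ b.length
instance (a : List Int) (b : List Int) : Decidable (Pre_bigger a b) := by unfold Pre_bigger; infer_instance
def pvWitness_bigger : List Int × List Int := ([1, 0], [1, 0])

-- When both mantissas are negative and sandwiched (the higher-exponent mantissa exceeds the other
-- but its fully shifted value falls below it), A's early return fires before shifting finishes and
-- returns the wrong boolean; B returns the correct comparison of a[0]*2^a[1] with b[0]*2^b[1].
def D_bigger (a : List Int) (b : List Int) : Prop :=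
  (b.headI < a.headI ∧ a.headI * 2 ^ (a.tail.headI - b.tail.headI).toNat < b.headI) ∨
  (a.headI < b.headI ∧ b.headI * 2 ^ (b.tail.headI - a.tail.headI).toNat ≤ a.headI)
instance (a : List Int) (b : List Int) : Decidable (D_bigger a b) := by unfold D_bigger; infer_instance

def Spec_bigger (a : List Int) (b : List Int) (out : Bool) : Prop := ¬ D_bigger a b → out = bigger_alt a b
instance (a : List Int) (b : List Int) (out : Bool) : Decidable (Spec_bigger a b out) := by unfold Spec_bigger; infer_instance

def pvDiffWitness_bigger : List Int × List Int := ([-2, 1], [-3, 0])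
def pvDiffWitnessOut_bigger : Bool × Bool := (true, false)

-- ===== CLAIM =====
def Claim_unchanged_bigger : Prop := ∀ (a : List Int) (b : List Int), Dom_bigger a b → Pre_bigger a b → Spec_bigger a b (bigger a b)
def Claim_changed_bigger : Prop := Dom_bigger (pvDiffWitness_bigger.1) (pvDiffWitness_bigger.2) ∧ Pre_bigger (pvDiffWitness_bigger.1) (pvDiffWitness_bigger.2) ∧ D_bigger (pvDiffWitness_bigger.1) (pvDiffWitness_bigger.2) ∧ bigger (pvDiffWitness_bigger.1) (pvDiffWitness_bigger.2) = pvDiffWitnessOut_bigger.1 ∧ bigger_alt (pvDiffWitness_bigger.1) (pvDiffWitness_bigger.2) = pvDiffWitnessOut_bigger.2 ∧ pvDiffWitnessOut_bigger.1 ≠ pvDiffWitnessOut_bigger.2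
def Claim_exact_bigger : Prop := ∀ (a : List Int) (b : List Int), Dom_bigger a b → Pre_bigger a b → D_bigger a b → bigger a b ≠ bigger_alt a b

-- ===== LEMMAS AND PROOFS =====

-- outside the sandwich condition, the early-exit loop computes exactly the shifted comparison
theorem loopA_eq (a0 b0 : Int) (n : Nat) (h : ¬(b0 < a0 ∧ a0 * 2 ^ n < b0)) :
    biggerLoopA a0 b0 n = decide (a0 * 2 ^ n ≥ b0) := by
  induction n generalizing a0 with
  | zero => simp [biggerLoopA]
  | succ n ih =>
    push Not at h
    by_cases hgt : a0 > b0
    · have hge : b0 ≤ a0 * 2 ^ (n + 1) := h hgt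
      simp [biggerLoopA, hgt, hge]
    · have hle : a0 ≤ b0 := by omega
      have harg : ¬(b0 < a0 * 2 ∧ a0 * 2 * 2 ^ n < b0) := by
        rintro ⟨h1, h2⟩
        have hpos : (0:Int) < a0 := by omega
        have h2n : (1:Int) ≤ 2 ^ n := by have := pow_pos (by norm_num : (0:Int) < 2) n; omega
        nlinarith
      have := ih (a0 * 2) harg
      have he : a0 * 2 * 2 ^ n = a0 * 2 ^ (n + 1) := by ring
      simp only [biggerLoopA, if_neg hgt, this, he]

theorem loopB_eq (a0 b0 : Int) (n : Nat) (h : ¬(a0 < b0 ∧ b0 * 2 ^ n ≤ a0)) :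
    biggerLoopB a0 b0 n = decide (a0 ≥ b0 * 2 ^ n) := by
  induction n generalizing b0 with
  | zero => simp [biggerLoopB]
  | succ n ih =>
    push Not at h
    by_cases hlt : a0 < b0
    · have hgt : b0 * 2 ^ (n + 1) > a0 := by have := h hlt; omega
      simp [biggerLoopB, hlt]
      linarith
    · have harg : ¬(a0 < b0 * 2 ∧ b0 * 2 * 2 ^ n ≤ a0) := by
        rintro ⟨h1, h2⟩
        have hpos : (0:Int) < b0 := by omega
        have h2n : (1:Int) ≤ 2 ^ n := by have := pow_pos (by norm_num : (0:Int) < 2) n; omega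
        nlinarith
      have := ih (b0 * 2) harg
      have he : b0 * 2 * 2 ^ n = b0 * 2 ^ (n + 1) := by ring
      simp only [biggerLoopB, if_neg hlt, this, he]

-- inside the sandwich condition A's early return fires (wrongly)
theorem loopA_diff (a0 b0 : Int) (n : Nat) (h1 : b0 < a0) (h2 : a0 * 2 ^ n < b0) :
    biggerLoopA a0 b0 n = true := by
  cases n with
  | zero => simp at h2; omega
  | succ n => simp [biggerLoopA, h1]

theorem loopB_diff (a0 b0 : Int) (n : Nat) (h1 : a0 < b0) (h2 : b0 * 2 ^ n ≤ a0) :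
    biggerLoopB a0 b0 n = false := by
  cases n with
  | zero => simp at h2; omega
  | succ n => simp [biggerLoopB, h1]



theorem bigger_cons (a0 a1 b0 b1 : Int) (ta tb : List Int) :
    bigger (a0 :: a1 :: ta) (b0 :: b1 :: tb) =
      if a1 ≥ b1 then biggerLoopA a0 b0 (a1 - b1).toNat
      else biggerLoopB a0 b0 (b1 - a1).toNat := by
  have h1 : PySem.List.pyGet? (a0 :: a1 :: ta) 1 = some a1 := by
    rw [show (1:Int) = ((1:Nat):Int) by norm_num, PySem.List.pyGet?_natCast]
    simp
  have h2 : PySem.List.pyGet? (b0 :: b1 :: tb) 1 = some b1 := by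
    rw [show (1:Int) = ((1:Nat):Int) by norm_num, PySem.List.pyGet?_natCast]
    simp
  simp only [bigger, PySem.List.pyGet?_zero_cons, h1, h2]

theorem bigger_alt_cons (a0 a1 b0 b1 : Int) (ta tb : List Int) :
    bigger_alt (a0 :: a1 :: ta) (b0 :: b1 :: tb) =
      (if a1 - b1 ≥ 0 then decide (a0 * 2 ^ (a1 - b1).toNat ≥ b0)
       else decide (a0 ≥ b0 * 2 ^ (-(a1 - b1)).toNat)) := by
  have h1 : PySem.List.pyGet? (a0 :: a1 :: ta) 1 = some a1 := by
    rw [show (1:Int) = ((1:Nat):Int) by norm_num, PySem.List.pyGet?_natCast]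
    simp
  have h2 : PySem.List.pyGet? (b0 :: b1 :: tb) 1 = some b1 := by
    rw [show (1:Int) = ((1:Nat):Int) by norm_num, PySem.List.pyGet?_natCast]
    simp
  simp only [bigger_alt, PySem.List.pyGet?_zero_cons, h1, h2, Option.bind_some, Option.map_some,
    Option.getD_some]

-- ===== VERDICT =====
theorem bigger_spec : Claim_unchanged_bigger := by
  unfold Claim_unchanged_bigger
  rintro a b _ ⟨ha, hb⟩ hnd
  match a, b with
  | a0 :: a1 :: ta, b0 :: b1 :: tb =>
    unfold D_bigger at hnd
    simp only [List.headI_cons, List.tail_cons] at hnd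
    push Not at hnd
    have hnd' := hnd
    rw [bigger_cons, bigger_alt_cons]
    by_cases hc : a1 - b1 ≥ 0
    · have hge : a1 ≥ b1 := by omega
      rw [if_pos hge, if_pos hc]
      refine loopA_eq a0 b0 (a1 - b1).toNat ?_
      rintro ⟨hx, hy⟩
      exact absurd (hnd'.1 hx) (by omega)
    · have hlt : ¬ a1 ≥ b1 := by omega
      rw [if_neg hlt, if_neg hc]
      have he : -(a1 - b1) = b1 - a1 := by ring
      rw [he]
      refine loopB_eq a0 b0 (b1 - a1).toNat ?_
      rintro ⟨hx, hy⟩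
      exact absurd (hnd'.2 hx) (by omega)

theorem bigger_changed : Claim_changed_bigger := by unfold Claim_changed_bigger; decide

theorem bigger_tight : Claim_exact_bigger := by
  unfold Claim_exact_bigger
  rintro a b _ ⟨ha, hb⟩ hd
  match a, b with
  | a0 :: a1 :: ta, b0 :: b1 :: tb =>
    unfold D_bigger at hd
    simp only [List.headI_cons, List.tail_cons] at hd
    rw [bigger_cons, bigger_alt_cons]
    rcases hd with ⟨h2, h3⟩ | ⟨h2, h3⟩
    · have hge : a1 ≥ b1 := by
        by_contra hq
        have : (a1 - b1).toNat = 0 := by omega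
        rw [this] at h3; simp at h3; omega
      have hc : a1 - b1 ≥ 0 := by omega
      rw [if_pos hge, if_pos hc, loopA_diff a0 b0 _ h2 h3]
      simp; omega
    · have hlt : ¬ a1 ≥ b1 := by
        intro hq
        have : (b1 - a1).toNat = 0 := by omega
        rw [this] at h3; simp at h3; omega
      have hc : ¬ a1 - b1 ≥ 0 := by omega
      rw [if_neg hlt, if_neg hc, loopB_diff a0 b0 _ h2 h3,
        show -(a1 - b1) = b1 - a1 by ring]
      simp
      exact h3
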